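-- pv_equiv track=rewrite | github.com/SashaChuma/LeetCode | 2818. Apply Operations to Maximize Score.py | count_left_lower_or_equal
-- ===== SOURCE A (Python) =====
-- def count_left_lower_or_equal(arr):
--     n = len(arr)
--     result = [0] * n
--     stack = []
--
--     for i in range(n):
--         count = 0
--
--         while stack and arr[i] > arr[stack[-1]]:
--             idx = stack.pop()
--             count += 1 + result[idx]
--
--         result[i] = count
--         stack.append(i)
--
--     return result
-- ===== SOURCE B (Python) =====
-- def count_left_lower_or_equal(arr):
--     result = []
--     for i in range(len(arr)):
--         count = 0
--         j = i - 1
--         while j >= 0 and arr[j] < arr[i]: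
--             count += 1
--             j -= 1
--         result.append(count)
--     return result
-- ===== Notes on version B (the rewrite author's own statement) =====
-- stated objective: simpler
-- what changed: Replaced the cross-iteration monotonic stack (which accumulates 1+result[idx] from popped indices) by an independent backward scan per index that just counts consecutive strictly-smaller left neighbours.
import Mathlib
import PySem

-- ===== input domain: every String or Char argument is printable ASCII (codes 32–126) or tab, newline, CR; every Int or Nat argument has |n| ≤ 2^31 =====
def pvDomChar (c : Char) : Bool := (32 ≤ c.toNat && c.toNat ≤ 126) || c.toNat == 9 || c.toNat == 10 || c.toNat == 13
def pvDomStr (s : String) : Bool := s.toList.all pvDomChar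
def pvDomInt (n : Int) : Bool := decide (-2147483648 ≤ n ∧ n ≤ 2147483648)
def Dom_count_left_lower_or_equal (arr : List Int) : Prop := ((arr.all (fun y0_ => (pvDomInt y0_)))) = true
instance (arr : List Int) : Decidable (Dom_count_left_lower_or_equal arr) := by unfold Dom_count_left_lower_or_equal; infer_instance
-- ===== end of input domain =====

-- B replaces A's cross-iteration monotonic stack (which reuses earlier results) by an
-- independent backward scan per index; simpler, at the cost of worst-case O(n^2).

-- ===== PORT A =====
-- the inner `while stack and arr[i] > arr[stack[-1]]` loop; stack head = Python's stack[-1]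
def popA (arr res : List Int) (x : Int) : Int → List Nat → Int × List Nat
  | count, [] => (count, [])
  | count, idx :: rest =>
    if x > arr.getD idx 0 then popA arr res x (count + (1 + res.getD idx 0)) rest
    else (count, idx :: rest)

-- one iteration of the `for i in range(n)` loop, state = (result, stack)
def stepA (arr : List Int) (st : List Int × List Nat) (i : Nat) : List Int × List Nat :=
  let p := popA arr st.1 (arr.getD i 0) 0 st.2
  (st.1.set i p.1, i :: p.2)

def count_left_lower_or_equal (arr : List Int) : List Int :=
  ((List.range arr.length).foldl (stepA arr)
    (List.replicate arr.length 0, ([] : List Nat))).1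

-- ===== PORT B =====
-- the inner `while j >= 0 and arr[j] < arr[i]` loop of Source B, argument = j + 1
def bCount (arr : List Int) (x : Int) : Nat → Int
  | 0 => 0
  | j+1 => if arr.getD j 0 < x then bCount arr x j + 1 else 0

def count_left_lower_or_equal_alt (arr : List Int) : List Int :=
  (List.range arr.length).map (fun i => bCount arr (arr.getD i 0) i)

-- ===== PRECONDITION & SPEC =====
def Spec_count_left_lower_or_equal (arr : List Int) (out : List Int) : Prop := out = count_left_lower_or_equal_alt arr
instance (arr : List Int) (out : List Int) : Decidable (Spec_count_left_lower_or_equal arr out) := by unfold Spec_count_left_lower_or_equal; infer_instance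

-- ===== CLAIM (what is proved, stated in full; the proofs are below) =====
def Claim_equal_count_left_lower_or_equal : Prop := ∀ (arr : List Int), Dom_count_left_lower_or_equal arr → Spec_count_left_lower_or_equal arr (count_left_lower_or_equal arr)

-- ===== LEMMAS AND PROOFS =====

-- Nat-valued shadow of bCount: length of the run of strictly-smaller elements left of m
def Lnat (arr : List Int) (x : Int) : Nat → Nat
  | 0 => 0
  | j+1 => if arr.getD j 0 < x then Lnat arr x j + 1 else 0

theorem bCount_eq (arr : List Int) (x : Int) : ∀ j, bCount arr x j = (Lnat arr x j : Int) := by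
  intro j; induction j with
  | zero => rfl
  | succ j ih => simp only [bCount, Lnat]; split_ifs <;> simp [ih]

theorem Lnat_le (arr : List Int) (x : Int) : ∀ m, Lnat arr x m ≤ m := by
  intro m; induction m with
  | zero => simp [Lnat]
  | succ m ih => simp only [Lnat]; split_ifs <;> omega

-- every element of the run is < x
theorem Lnat_run (arr : List Int) (x : Int) :
    ∀ m j, m - Lnat arr x m ≤ j → j < m → arr.getD j 0 < x := by
  intro m
  induction m with
  | zero => intro j _ h; omega
  | succ m ih =>
    intro j h1 h2
    by_cases hx : arr.getD m 0 < x
    · simp only [Lnat, if_pos hx] at h1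
      rcases Nat.lt_succ_iff_lt_or_eq.mp h2 with h | h
      · exact ih j (by have := Lnat_le arr x m; omega) h
      · subst h; exact hx
    · simp only [Lnat, if_neg hx] at h1; omega

-- the run splits at any point it covers
theorem Lnat_split (arr : List Int) (x : Int) :
    ∀ m s, s ≤ m → (∀ j, s ≤ j → j < m → arr.getD j 0 < x) →
      Lnat arr x m = (m - s) + Lnat arr x s := by
  intro m
  induction m with
  | zero => intro s hs _; interval_cases s; simp
  | succ m ih =>
    intro s hs hrun
    rcases Nat.lt_succ_iff_lt_or_eq.mp (Nat.lt_succ_of_le hs) with h | h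
    · have hx : arr.getD m 0 < x := hrun m (by omega) (by omega)
      simp only [Lnat, if_pos hx]
      have := ih s (by omega) (fun j h1 h2 => hrun j h1 (by omega))
      omega
    · subst h; simp

-- characterization: run bounded below by a stopping element
theorem Lnat_char (arr : List Int) (x : Int) (m s : Nat) (hs : s ≤ m)
    (hrun : ∀ j, s ≤ j → j < m → arr.getD j 0 < x)
    (hstop : s = 0 ∨ ¬ arr.getD (s - 1) 0 < x) :
    Lnat arr x m = m - s := by
  have h := Lnat_split arr x m s hs hrun
  have hz : Lnat arr x s = 0 := by
    rcases hstop with h0 | h0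
    · subst h0; rfl
    · cases s with
      | zero => rfl
      | succ u =>
        have h0' : ¬ arr.getD u 0 < x := by simpa using h0
        simp only [Lnat, if_neg h0']
  omega

-- per-index answer of B
def Lk (arr : List Int) (k : Nat) : Nat := Lnat arr (arr.getD k 0) k

-- canonical stack invariant: Chain t stk means the stack covers exactly [0, t)
def Chain (arr : List Int) : Nat → List Nat → Prop
  | t, [] => t = 0
  | t, a :: rest => a + 1 = t ∧ Chain arr (a - Lk arr a) rest

theorem popA_spec (arr res : List Int) (x : Int) (m : Nat)
    (hres : ∀ a : Nat, a < m → res.getD a 0 = (Lk arr a : Int)) :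
    ∀ (stk : List Nat) (t : Nat), Chain arr t stk → t ≤ m →
      (∀ j, t ≤ j → j < m → arr.getD j 0 < x) →
      ∃ stk', popA arr res x ((m - t : Nat) : Int) stk = ((Lnat arr x m : Int), stk')
        ∧ Chain arr (m - Lnat arr x m) stk' := by
  intro stk
  induction stk with
  | nil =>
    intro t hc ht hrun
    have ht0 : t = 0 := hc
    subst ht0
    have hL : Lnat arr x m = m := by
      have := Lnat_split arr x m 0 (by omega) (fun j h1 h2 => hrun j (by omega) h2)
      simpa using this
    exact ⟨[], by simp [popA, hL], by simp [Chain, hL]⟩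
  | cons a rest ih =>
    intro t hc ht hrun
    obtain ⟨ha, hcr⟩ := hc
    by_cases hx : arr.getD a 0 < x
    · have hLa : Lk arr a ≤ a := Lnat_le arr _ a
      have hcount : ((m - t : Nat) : Int) + (1 + res.getD a 0)
          = ((m - (a - Lk arr a) : Nat) : Int) := by
        rw [hres a (by omega)]
        push_cast [Nat.cast_sub (by omega : t ≤ m), Nat.cast_sub (by omega : a - Lk arr a ≤ m),
          Nat.cast_sub (by omega : Lk arr a ≤ a)]
        omega
      have hrun' : ∀ j, a - Lk arr a ≤ j → j < m → arr.getD j 0 < x := by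
        intro j h1 h2
        by_cases hj : j < a
        · exact lt_trans (Lnat_run arr (arr.getD a 0) a j h1 hj) hx
        · rcases Nat.eq_or_lt_of_le (Nat.le_of_not_lt hj) with h | h
          · subst h; exact hx
          · exact hrun j (by omega) h2
      obtain ⟨stk', heq, hch⟩ := ih (a - Lk arr a) hcr (by omega) hrun'
      refine ⟨stk', ?_, hch⟩
      simp only [popA, if_pos hx, hcount, heq]
    · have hstop : ¬ arr.getD (t - 1) 0 < x := by
        have h : t - 1 = a := by omega
        rw [h]; exact hx
      have hL : Lnat arr x m = m - t := Lnat_char arr x m t ht hrun (Or.inr hstop)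
      refine ⟨a :: rest, ?_, ?_⟩
      · have hx' : ¬ x > arr.getD a 0 := hx
        simp only [popA, if_neg hx', hL]
      · have : m - Lnat arr x m = t := by omega
        exact this ▸ ⟨ha, hcr⟩

def resF (arr : List Int) (m : Nat) : List Int :=
  (List.range arr.length).map (fun k => if k < m then ((Lk arr k : Nat) : Int) else 0)

theorem getD_map_range (n : Nat) (f : Nat → Int) (a : Nat) (h : a < n) :
    ((List.range n).map f).getD a 0 = f a := by
  simp [List.getD, h]

theorem resF_set (arr : List Int) (m : Nat) (_hm : m < arr.length) :
    (resF arr m).set m ((Lk arr m : Nat) : Int) = resF arr (m + 1) := by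
  apply List.ext_getElem
  · simp [resF]
  · intro k h1 h2
    have hk : k < arr.length := by simpa [resF] using h2
    simp only [resF, List.getElem_set, List.getElem_map, List.getElem_range]
    by_cases hkm : m = k
    · subst hkm; simp
    · simp only [if_neg hkm]
      by_cases h : k < m
      · simp [h, Nat.lt_succ_of_lt h]
      · simp [h, show ¬ k < m + 1 by omega]

theorem fold_inv (arr : List Int) :
    ∀ m, m ≤ arr.length →
      ∃ stk, (List.range m).foldl (stepA arr) (List.replicate arr.length 0, ([] : List Nat))
          = (resF arr m, stk) ∧ Chain arr m stk := by
  intro m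
  induction m with
  | zero =>
    intro _
    refine ⟨[], ?_, rfl⟩
    simp only [List.range_zero, List.foldl_nil]
    have : resF arr 0 = List.replicate arr.length 0 := by
      simp [resF, List.map_const']
    rw [this]
  | succ m ih =>
    intro hm
    obtain ⟨stk, heq, hch⟩ := ih (by omega)
    have hres : ∀ a : Nat, a < m → (resF arr m).getD a 0 = (Lk arr a : Int) := by
      intro a ha
      rw [resF, getD_map_range _ _ a (by omega)]
      simp [ha]
    obtain ⟨stk', hpop, hch'⟩ :=
      popA_spec arr (resF arr m) (arr.getD m 0) m hres stk m hch (le_refl m)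
        (fun j h1 h2 => absurd h2 (by omega))
    refine ⟨m :: stk', ?_, ?_⟩
    · rw [List.range_succ, List.foldl_append, heq]
      simp only [List.foldl_cons, List.foldl_nil, stepA]
      have h0 : ((m - m : Nat) : Int) = 0 := by simp
      rw [h0] at hpop
      rw [hpop]
      exact congrArg (fun r => (r, m :: stk')) (resF_set arr m (by omega))
    · exact ⟨rfl, hch'⟩

theorem main_eq (arr : List Int) :
    count_left_lower_or_equal arr = count_left_lower_or_equal_alt arr := by
  obtain ⟨stk, heq, _⟩ := fold_inv arr arr.length (le_refl _)
  unfold count_left_lower_or_equal count_left_lower_or_equal_alt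
  rw [heq]
  simp only [resF]
  apply List.map_congr_left
  intro k hk
  have hk' : k < arr.length := List.mem_range.mp hk
  simp [hk', Lk, bCount_eq]

-- ===== VERDICT (by name: the statement is the Claim_ definition above) =====
theorem count_left_lower_or_equal_spec : Claim_equal_count_left_lower_or_equal := by
  intro arr _
  exact main_eq arr
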